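-- pv_equiv track=rewrite | github.com/woobottle/TIL | Algorithm/Zerobase/Week8/q1.py | solution
-- ===== SOURCE A (Python) =====
-- def solution(N):
--   ameba = [1, 2]
--   for i in range(2, N+1) :
--     ameba.append(ameba[i-2] + ameba[i-1])
--
--   time = [0] * (N + 1)
--   for i in range(N + 1) :
--     if i == 0 :
--       time[i] = 1
--     elif i == 1 :
--       time[i] = 2
--     else :
--       time[i] = 2 * (ameba[i] - ameba[i-1])
--
--   return sum(time)
-- ===== SOURCE B (Python) =====
-- def solution(N):
--     # Closed form: the per-day sequence telescopes, so the answer is 2*Fib(N+2)-1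
--     # (Fib(0)=0, Fib(1)=1), computed with fast doubling in O(log N) multiplications.
--     if N < 0:
--         return 0
--
--     def fd(n):
--         # returns (Fib(n), Fib(n+1))
--         if n == 0:
--             return (0, 1)
--         a, b = fd(n // 2)
--         c = a * (2 * b - a)
--         d = a * a + b * b
--         if n % 2 == 1:
--             return (d, c + d)
--         else:
--             return (c, d)
--
--     return 2 * fd(N + 2)[0] - 1
-- ===== Notes on version B (the rewrite author's own statement) =====
-- stated objective: faster
-- what changed: Replaced the two O(N) list-building loops with the telescoped closed form 2*Fib(N+2)-1 computed by fast-doubling Fibonacci.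
import Mathlib
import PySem

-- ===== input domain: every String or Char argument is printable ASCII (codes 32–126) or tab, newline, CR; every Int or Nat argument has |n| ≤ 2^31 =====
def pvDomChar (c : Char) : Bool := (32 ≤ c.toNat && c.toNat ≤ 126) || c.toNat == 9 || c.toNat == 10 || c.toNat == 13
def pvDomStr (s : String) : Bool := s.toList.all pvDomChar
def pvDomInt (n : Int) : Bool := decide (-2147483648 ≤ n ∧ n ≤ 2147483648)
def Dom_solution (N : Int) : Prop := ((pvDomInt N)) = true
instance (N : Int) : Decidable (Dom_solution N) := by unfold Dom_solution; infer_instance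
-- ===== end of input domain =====

-- B replaces A's two O(N) accumulation loops by the telescoped closed form
-- 2*Fib(N+2)-1, computed with fast-doubling Fibonacci.


-- ===== PORT A =====
def solution (N : Int) : Int :=
  let ameba := (PySem.List.pyRange 2 (N+1) 1).foldl
    (fun a i => a ++ [PySem.List.pyGetD a (i-2) 0 + PySem.List.pyGetD a (i-1) 0])
    [1, 2]
  let time0 := PySem.List.pyRepeat [(0:Int)] (N+1)
  let time := (PySem.List.pyRange 0 (N+1) 1).foldl
    (fun t i =>
      if i = 0 then PySem.List.pySetD t i 1
      else if i = 1 then PySem.List.pySetD t i 2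
      else PySem.List.pySetD t i
        (2 * (PySem.List.pyGetD ameba i 0 - PySem.List.pyGetD ameba (i-1) 0)))
    time0
  time.sum

-- ===== PORT B =====
-- fast doubling: fd n = (Fib n, Fib (n+1))
def fd : Nat → Int × Int
  | 0 => (0, 1)
  | (n+1) =>
    let p := fd ((n+1) / 2)
    let a := p.1
    let b := p.2
    let c := a * (2 * b - a)
    let d := a * a + b * b
    if (n+1) % 2 = 1 then (d, c + d) else (c, d)
decreasing_by omega

def solution_alt (N : Int) : Int :=
  if N < 0 then 0 else 2 * (fd (N+2).toNat).1 - 1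

-- ===== PRECONDITION & SPEC =====
def Spec_solution (N : Int) (out : Int) : Prop := out = solution_alt N
instance (N : Int) (out : Int) : Decidable (Spec_solution N out) := by unfold Spec_solution; infer_instance

-- ===== CLAIM (what is proved, stated in full; the proofs are below) =====
def Claim_equal_solution : Prop := ∀ (N : Int), Dom_solution N → Spec_solution N (solution N)

-- ===== LEMMAS AND PROOFS =====

theorem fd_eq (n : Nat) : fd n = ((Nat.fib n : Int), (Nat.fib (n+1) : Int)) := by
  induction n using Nat.strong_induction_on with
  | _ n ih =>
    match n with
    | 0 => simp [fd]
    | (m+1) =>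
      rw [fd]
      have hlt : (m+1)/2 < m+1 := by omega
      rw [ih _ hlt]
      set k := (m+1)/2 with hk
      have hfle : Nat.fib k ≤ 2 * Nat.fib (k+1) := by
        have := Nat.fib_le_fib_succ (n := k); omega
      rcases Nat.even_or_odd (m+1) with ⟨t,ht⟩ | ⟨t,ht⟩
      · have h2 : m+1 = 2*k := by omega
        have hmod : (m+1) % 2 = 0 := by omega
        simp only [hmod]
        norm_num
        constructor
        · rw [h2, Nat.fib_two_mul]
          push_cast [Nat.sub_add_cancel, hfle]
          ring
        · rw [h2, Nat.fib_two_mul_add_one]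
          push_cast
          ring
      · have h2 : m+1 = 2*k+1 := by omega
        have hmod : (m+1) % 2 = 1 := by omega
        simp only [hmod]
        norm_num
        constructor
        · rw [h2, Nat.fib_two_mul_add_one]; push_cast; ring
        · rw [h2]
          have h3 : 2*k+1+1 = 2*(k+1) := by ring
          have hadd : Nat.fib (k+1+1) = Nat.fib k + Nat.fib (k+1) := Nat.fib_add_two
          have hsub : 2 * Nat.fib (k+1+1) - Nat.fib (k+1) = 2 * Nat.fib k + Nat.fib (k+1) := by omega
          rw [h3, Nat.fib_two_mul, hsub]
          push_cast
          ring

-- the list A's first loop builds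
def fibL (k : Nat) : List Int := (List.range k).map (fun j => (Nat.fib (j+2) : Int))

theorem ameba_loop (n : Nat) :
    (PySem.List.pyRange 2 ((n:Int)+1) 1).foldl
      (fun a i => a ++ [PySem.List.pyGetD a (i-2) 0 + PySem.List.pyGetD a (i-1) 0])
      [1, 2] = fibL (max (n+1) 2) := by
  induction n with
  | zero => rw [PySem.List.pyRange_one_eq_nil (by norm_num)]; decide
  | succ m ih =>
    match m, ih with
    | 0, _ => rw [PySem.List.pyRange_one_eq_nil (by norm_num)]; decide
    | (p+1), ih =>
      have hcast : ((p+1+1:Nat):Int)+1 = (((p+1:Nat):Int)+1) + 1 := by push_cast; ring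
      rw [hcast, PySem.List.pyRange_one_succ_right (by push_cast; omega), List.foldl_append]
      rw [ih]
      have hmax : max (p+1+1) 2 = p+2 := by omega
      have hmax2 : max (p+1+1+1) 2 = p+3 := by omega
      rw [hmax, hmax2]
      simp only [List.foldl_cons, List.foldl_nil]
      have e1 : ((p+1:Nat):Int) + 1 - 2 = ((p:Nat):Int) := by push_cast; ring
      have e2 : ((p+1:Nat):Int) + 1 - 1 = ((p+1:Nat):Int) := by push_cast; ring
      rw [e1, e2, PySem.List.pyGetD_natCast, PySem.List.pyGetD_natCast]
      have g1 : (fibL (p+2)).getD p 0 = (Nat.fib (p+2) : Int) := by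
        simp [fibL, List.getD_eq_getElem?_getD]
      have g2 : (fibL (p+2)).getD (p+1) 0 = (Nat.fib (p+3) : Int) := by
        simp [fibL, List.getD_eq_getElem?_getD]
      rw [g1, g2]
      simp [fibL, List.range_succ, Nat.fib_add_two]

-- the value A's second loop writes at index j
def gTime (j : Nat) : Int :=
  if j = 0 then 1 else if j = 1 then 2
  else 2 * ((Nat.fib (j+2) : Int) - (Nat.fib (j+1) : Int))

theorem sum_gTime (n : Nat) :
    ((List.range (n+1)).map gTime).sum = 2 * (Nat.fib (n+2) : Int) - 1 := by
  induction n with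
  | zero => decide
  | succ m ih =>
    rw [List.range_succ, List.map_append, List.sum_append, ih]
    match m with
    | 0 => decide
    | (p+1) =>
      simp only [gTime, List.map_cons, List.map_nil, List.sum_cons, List.sum_nil]
      norm_num
      have : Nat.fib (p+1+1+2) = Nat.fib (p+1+2) + Nat.fib (p+1+1) := by
        rw [Nat.add_comm (Nat.fib (p+1+2))]; exact Nat.fib_add_two
      rw [this]
      push_cast
      ring

-- A's second loop, started on the zero list, fills in gTime values left to right
theorem time_loop (n : Nat) (m : Nat) (hm : m ≤ n+1) :
    (PySem.List.pyRange 0 ((m:Nat):Int) 1).foldl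
      (fun t i =>
        if i = 0 then PySem.List.pySetD t i 1
        else if i = 1 then PySem.List.pySetD t i 2
        else PySem.List.pySetD t i
          (2 * (PySem.List.pyGetD (fibL (max (n+1) 2)) i 0 -
                PySem.List.pyGetD (fibL (max (n+1) 2)) (i-1) 0)))
      (List.replicate (n+1) (0:Int))
    = (List.range m).map gTime ++ List.replicate (n+1-m) 0 := by
  induction m with
  | zero => simp [PySem.List.pyRange_one_eq_nil]
  | succ q ih =>
    have hq : q ≤ n+1 := by omega
    have hcast : ((q+1:Nat):Int) = ((q:Nat):Int) + 1 := by push_cast; ring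
    rw [hcast, PySem.List.pyRange_one_succ_right (by positivity), List.foldl_append, ih hq]
    simp only [List.foldl_cons, List.foldl_nil]
    have hlen : q < max (n+1) 2 := by omega
    have hget : PySem.List.pyGetD (fibL (max (n+1) 2)) ((q:Nat):Int) 0 = (Nat.fib (q+2) : Int) := by
      rw [PySem.List.pyGetD_natCast]
      simp [fibL, List.getD_eq_getElem?_getD, hlen]
    have hq1 : q ≤ n := by omega
    have hrep : List.replicate (n+1-q) (0:Int) = 0 :: List.replicate (n-q) 0 := by
      rw [show n+1-q = (n-q)+1 from by omega, List.replicate_succ]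
    have hset : ∀ v : Int,
        PySem.List.pySetD ((List.range q).map gTime ++ (0:Int) :: List.replicate (n-q) 0) ((q:Nat):Int) v
        = (List.range q).map gTime ++ v :: List.replicate (n-q) 0 := by
      intro v
      rw [PySem.List.pySetD_natCast]
      rw [List.set_append_right _ _ (by simp)]
      simp
    rw [hrep]
    have hrhs : (List.range (q+1)).map gTime ++ List.replicate (n+1-(q+1)) (0:Int)
        = (List.range q).map gTime ++ gTime q :: List.replicate (n-q) 0 := by
      rw [List.range_succ, List.map_append, show n+1-(q+1) = n-q from by omega]
      simp
    rw [hrhs]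
    match q, hget, hset with
    | 0, hget, hset => simpa using hset 1
    | 1, hget, hset =>
      rw [if_neg (by norm_num), if_pos (by norm_num), hset 2]
      norm_num [gTime]
    | (p+2), hget, hset =>
      rw [if_neg (by positivity), if_neg (by push_cast; omega)]
      have e1 : ((p+2:Nat):Int) - 1 = ((p+1:Nat):Int) := by push_cast; ring
      have hget2 : PySem.List.pyGetD (fibL (max (n+1) 2)) (((p+2:Nat):Int) - 1) 0
          = (Nat.fib (p+3) : Int) := by
        rw [e1, PySem.List.pyGetD_natCast]
        simp [fibL, List.getD_eq_getElem?_getD, show p+1 < max (n+1) 2 from by omega]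
      rw [hget, hget2, hset _]
      norm_num [gTime, show ¬(p+2 = 0) from by omega, show ¬(p+2 = 1) from by omega]

-- ===== VERDICT (by name: the statement is the Claim_ definition above) =====
theorem solution_spec : Claim_equal_solution := by
  intro N _
  unfold Spec_solution
  rcases lt_or_ge N 0 with hneg | hpos
  · unfold solution solution_alt
    rw [PySem.List.pyRange_one_eq_nil (by omega), PySem.List.pyRange_one_eq_nil (by omega)]
    simp only [List.foldl_nil, if_pos hneg]
    rw [PySem.List.pyRepeat_singleton]
    simp [List.sum_replicate]
  · obtain ⟨n, rfl⟩ : ∃ n : Nat, N = (n : Int) := ⟨N.toNat, (Int.toNat_of_nonneg hpos).symm⟩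
    unfold solution solution_alt
    simp only
    rw [ameba_loop n, PySem.List.pyRepeat_singleton]
    have htn : ((n:Int)+1).toNat = n+1 := by omega
    rw [htn]
    have hrange : PySem.List.pyRange 0 ((n:Int)+1) 1 = PySem.List.pyRange 0 (((n+1:Nat)):Int) 1 := by
      norm_num
    rw [hrange, time_loop n (n+1) le_rfl]
    rw [if_neg (by omega)]
    have htn2 : ((n:Int)+2).toNat = n+2 := by omega
    rw [htn2, fd_eq]
    simp [sum_gTime n]
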